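-- pv_equiv track=rewrite | github.com/MrArliton/RaspServerFA | faCoding.py | cleanBytes
-- ===== SOURCE A (Python) =====
-- def cleanBytes(byte):
--     i = 0;
--     while(len(byte)>i):
--         if(byte[i]==0):
--             byte.pop(i)
--         else:
--             i+=1
--     return byte
-- ===== SOURCE B (Python) =====
-- def cleanBytes(byte):
--     w = 0
--     for r in range(len(byte)):
--         if byte[r] != 0:
--             byte[w] = byte[r]
--             w += 1
--     del byte[w:]
--     return byte
-- ===== Notes on version B (the rewrite author's own statement) =====
-- stated objective: faster
-- what changed: Replaces the while-loop that repeatedly pops zeros out of the middle of the list with a single two-pointer compaction pass (write index over read index) followed by one bulk truncation.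
import Mathlib
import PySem

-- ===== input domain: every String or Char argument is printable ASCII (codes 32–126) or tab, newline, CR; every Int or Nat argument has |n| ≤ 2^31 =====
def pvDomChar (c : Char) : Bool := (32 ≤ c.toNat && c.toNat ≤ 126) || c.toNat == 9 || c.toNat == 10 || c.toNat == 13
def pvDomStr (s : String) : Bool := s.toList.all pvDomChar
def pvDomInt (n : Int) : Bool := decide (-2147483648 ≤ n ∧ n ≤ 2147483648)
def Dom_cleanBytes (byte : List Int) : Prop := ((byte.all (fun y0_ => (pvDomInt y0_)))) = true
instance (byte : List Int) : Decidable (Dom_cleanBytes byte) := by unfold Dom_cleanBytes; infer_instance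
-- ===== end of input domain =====

-- B replaces A's repeated mid-list pops with one two-pointer compaction pass plus a bulk
-- truncation. A mutates its argument in place (Python); the equivalence proved here is about
-- the returned value (B performs the same final mutation).

-- ===== PORT A =====
-- while len(byte) > i: if byte[i] == 0: byte.pop(i) else: i += 1
-- byte.pop(i) at an in-range index i removes the element at i: List.eraseIdx (exact here since 0 ≤ i < len).
def cleanBytesLoopA (byte : List Int) (i : Nat) : List Int :=
  if h : byte.length > i then
    if byte[i]'h = 0 then cleanBytesLoopA (byte.eraseIdx i) i
    else cleanBytesLoopA byte (i + 1)
  else byte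
termination_by byte.length - i
decreasing_by
  all_goals try simp only [List.length_eraseIdx]
  all_goals try split
  all_goals omega

def cleanBytes (byte : List Int) : List Int := cleanBytesLoopA byte 0

-- ===== PORT B =====
-- for r in range(len(byte)): if byte[r] != 0: byte[w] = byte[r]; w += 1
def cleanBytesStepB (st : List Int × Int) (r : Int) : List Int × Int :=
  if PySem.List.pyGetD st.1 r 0 ≠ 0 then
    (PySem.List.pySetD st.1 st.2 (PySem.List.pyGetD st.1 r 0), st.2 + 1)
  else st

def cleanBytes_alt (byte : List Int) : List Int :=
  let st := (PySem.List.pyRange 0 byte.length 1).foldl cleanBytesStepB (byte, 0)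
  -- del byte[w:]  ⇒  result is byte[:w]
  PySem.List.slice st.1 none (some st.2)

-- ===== PRECONDITION & SPEC =====
def Spec_cleanBytes (byte : List Int) (out : List Int) : Prop := out = cleanBytes_alt byte
instance (byte : List Int) (out : List Int) : Decidable (Spec_cleanBytes byte out) := by unfold Spec_cleanBytes; infer_instance

-- ===== CLAIM (what is proved, stated in full; the proofs are below) =====
def Claim_equal_cleanBytes : Prop := ∀ (byte : List Int), Dom_cleanBytes byte → Spec_cleanBytes byte (cleanBytes byte)

-- ===== LEMMAS AND PROOFS =====

-- A's loop computes: the untouched prefix ++ the nonzero elements of the rest.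
theorem loopA_eq (byte : List Int) (i : Nat) :
    cleanBytesLoopA byte i = byte.take i ++ (byte.drop i).filter (fun x => !(x == 0)) := by
  rw [cleanBytesLoopA]
  split
  · rename_i h
    have hdrop : byte.drop i = byte[i] :: byte.drop (i + 1) := List.drop_eq_getElem_cons h
    split
    · rename_i h0
      rw [loopA_eq (byte.eraseIdx i) i, List.eraseIdx_eq_take_drop_succ]
      rw [List.take_append_of_le_length (by simp [List.length_take]; omega)]
      rw [List.drop_append_of_le_length (by simp [List.length_take]; omega)]
      simp [List.take_take, hdrop, h0]
    · rename_i h0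
      rw [loopA_eq byte (i + 1), hdrop, List.filter_cons]
      have ht : byte.take (i + 1) = byte.take i ++ [byte[i]] := by
        rw [List.take_add_one, List.getElem?_eq_getElem h]; rfl
      rw [ht, List.append_assoc]
      simp [h0]
  · rename_i h
    have hle : byte.length ≤ i := by omega
    simp [List.take_of_length_le hle, List.drop_of_length_le hle]
termination_by byte.length - i
decreasing_by
  all_goals try simp only [List.length_eraseIdx]
  all_goals try split
  all_goals omega

-- B's fold invariant: after processing read indices < r, the first w slots hold the nonzero
-- elements of byte.take r, the slots from r on are still the original suffix, and the final
-- answer is byte.filter (≠ 0).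
theorem foldB_inv (byte arr : List Int) (r w : Nat)
    (hlen : arr.length = byte.length) (hr : r ≤ byte.length) (hw : w ≤ r)
    (htake : arr.take w = (byte.take r).filter (fun x => !(x == 0)))
    (hwlen : w = ((byte.take r).filter (fun x => !(x == 0))).length)
    (hdrop : arr.drop r = byte.drop r) :
    (fun st => PySem.List.slice st.1 none (some st.2))
      ((PySem.List.pyRange (r : Int) (byte.length : Int) 1).foldl cleanBytesStepB (arr, (w : Int)))
      = byte.filter (fun x => !(x == 0)) := by
  by_cases hlt : r < byte.length
  · rw [PySem.List.pyRange_one_cons (by exact_mod_cast hlt), List.foldl_cons]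
    have hrarr : r < arr.length := by omega
    have hq : arr[r]? = byte[r]? := by
      have h0g := congrArg (fun l => l[0]?) hdrop
      simpa [List.getElem?_drop] using h0g
    have hget : PySem.List.pyGetD arr (r : Int) 0 = byte[r] := by
      rw [PySem.List.pyGetD_natCast, List.getD_eq_getElem?_getD, hq,
        List.getElem?_eq_getElem hlt]
      rfl
    have htail : arr.drop (r + 1) = byte.drop (r + 1) := by
      have := congrArg List.tail hdrop
      simpa [List.tail_drop] using this
    have htake_r1 : byte.take (r + 1) = byte.take r ++ [byte[r]] := by
      rw [List.take_add_one, List.getElem?_eq_getElem hlt]; rfl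
    by_cases h0 : byte[r] = 0
    · -- zero: state unchanged
      have : cleanBytesStepB (arr, (w : Int)) (r : Int) = (arr, (w : Int)) := by
        simp [cleanBytesStepB, hget, h0]
      rw [this]
      exact foldB_inv byte arr (r + 1) w hlen (by omega) (by omega)
        (by rw [htake_r1]; simpa [List.filter_append, h0] using htake)
        (by rw [htake_r1]; simpa [List.filter_append, h0] using hwlen)
        htail
    · -- nonzero: write byte[r] at w, bump w
      have hstep : cleanBytesStepB (arr, (w : Int)) (r : Int)
          = (arr.set w byte[r], ((w + 1 : Nat) : Int)) := by
        simp [cleanBytesStepB, hget, h0, PySem.List.pySetD_natCast]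
      rw [hstep]
      have hwarr : w < arr.length := by omega
      exact foldB_inv byte (arr.set w byte[r]) (r + 1) (w + 1) (by simp [hlen]) (by omega) (by omega)
        (by
          rw [htake_r1, List.filter_append]
          have : (arr.set w byte[r]).take (w + 1) = arr.take w ++ [byte[r]] := by
            rw [List.set_eq_take_cons_drop _ hwarr, List.take_append]
            simp [List.take_take, List.length_take, min_eq_left (le_of_lt hwarr)]
          rw [this, htake]
          simp [h0])
        (by rw [htake_r1, List.filter_append]; simp [h0]; omega)
        (by rw [← htail]; exact List.drop_set_of_lt (by omega))
  · have hr' : r = byte.length := by omega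
    subst hr'
    rw [PySem.List.pyRange_one_eq_nil (le_refl _), List.foldl_nil]
    simp only
    rw [PySem.List.slice_to_natCast]
    rw [List.take_length] at htake
    exact htake
termination_by byte.length - r

theorem cleanBytes_spec : Claim_equal_cleanBytes := by
  intro byte _
  unfold Spec_cleanBytes cleanBytes cleanBytes_alt
  rw [loopA_eq]
  simpa using (foldB_inv byte byte 0 0 rfl (Nat.zero_le _) (le_refl _) (by simp) (by simp) rfl).symm
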